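-- pv_equiv track=rewrite | github.com/elBossio/MPI | MPI_fourth.py | distribute_workload
-- ===== SOURCE A (Python) =====
-- def distribute_workload(matrix_size, comm_size):
--     rows_per_process = matrix_size // comm_size
--     remaining_rows = matrix_size % comm_size
--     offset = 0
--     workload_parts = []
--
--     for _ in range(comm_size):
--         part_size = rows_per_process + (1 if remaining_rows > 0 else 0)
--         workload_parts.append([offset, offset + part_size])
--         offset += part_size
--         remaining_rows -= 1
--
--     return workload_parts
-- ===== SOURCE B (Python) =====
-- def distribute_workload(matrix_size, comm_size):
--     q, r = divmod(matrix_size, comm_size)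
--     return [[i * q + min(i, r), (i + 1) * q + min(i + 1, r)]
--             for i in range(comm_size)]
-- ===== Notes on version B (the rewrite author's own statement) =====
-- stated objective: alternative
-- what changed: Replaces A's stateful loop (running offset, decrementing remaining-rows counter) with a stateless comprehension computing each range in closed form from its index: start = i*q + min(i, r).
import Mathlib
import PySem

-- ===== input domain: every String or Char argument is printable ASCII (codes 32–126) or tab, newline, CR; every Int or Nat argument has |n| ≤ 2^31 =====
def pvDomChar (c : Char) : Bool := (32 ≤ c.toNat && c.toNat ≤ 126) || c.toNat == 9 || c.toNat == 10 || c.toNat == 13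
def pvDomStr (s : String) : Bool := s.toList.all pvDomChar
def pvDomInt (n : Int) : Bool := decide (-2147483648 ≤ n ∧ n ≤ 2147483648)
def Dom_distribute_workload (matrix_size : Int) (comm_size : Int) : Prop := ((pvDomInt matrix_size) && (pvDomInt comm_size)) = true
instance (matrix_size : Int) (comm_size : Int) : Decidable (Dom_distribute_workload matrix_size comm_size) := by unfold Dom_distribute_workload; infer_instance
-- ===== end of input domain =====

-- B replaces A's stateful loop (running offset, decrementing counter) with closed-form per-index arithmetic (objective: alternative).

-- ===== PORT A =====
def distribute_workload (matrix_size : Int) (comm_size : Int) : List (List Int) :=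
  let rows_per_process := PySem.Int.floordiv matrix_size comm_size
  let st := (PySem.List.pyRange 0 comm_size 1).foldl
    (fun (s : Int × Int × List (List Int)) _ =>
      let part_size := rows_per_process + (if s.2.1 > 0 then 1 else 0)
      (s.1 + part_size, s.2.1 - 1, s.2.2 ++ [[s.1, s.1 + part_size]]))
    (0, PySem.Int.mod matrix_size comm_size, [])
  st.2.2

-- ===== PORT B =====
def distribute_workload_alt (matrix_size : Int) (comm_size : Int) : List (List Int) :=
  let q := PySem.Int.floordiv matrix_size comm_size
  let r := PySem.Int.mod matrix_size comm_size
  (PySem.List.pyRange 0 comm_size 1).map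
    (fun i => [i * q + min i r, (i + 1) * q + min (i + 1) r])

-- ===== PRECONDITION & SPEC =====
-- Python A raises ZeroDivisionError exactly when comm_size == 0; nothing else is excluded.
def Pre_distribute_workload (matrix_size : Int) (comm_size : Int) : Prop := comm_size ≠ 0
instance (matrix_size : Int) (comm_size : Int) : Decidable (Pre_distribute_workload matrix_size comm_size) := by unfold Pre_distribute_workload; infer_instance
def pvWitness_distribute_workload : Int × Int := (10, 3)

def Spec_distribute_workload (matrix_size : Int) (comm_size : Int) (out : List (List Int)) : Prop := out = distribute_workload_alt matrix_size comm_size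
instance (matrix_size : Int) (comm_size : Int) (out : List (List Int)) : Decidable (Spec_distribute_workload matrix_size comm_size out) := by unfold Spec_distribute_workload; infer_instance

-- ===== CLAIM (what is proved, stated in full; the proofs are below) =====
def Claim_equal_distribute_workload : Prop := ∀ (matrix_size : Int) (comm_size : Int), Dom_distribute_workload matrix_size comm_size → Pre_distribute_workload matrix_size comm_size → Spec_distribute_workload matrix_size comm_size (distribute_workload matrix_size comm_size)

-- ===== LEMMAS AND PROOFS =====

-- Loop invariant for A: after n iterations (with 0 ≤ r, as holds for r = m mod c, c > 0)
-- the state is (n*q + min n r, r - n, the first n closed-form ranges of B).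
lemma dw_loop_inv (q r : Int) (hr : 0 ≤ r) (n : Nat) :
    (List.range n).foldl
      (fun (s : Int × Int × List (List Int)) (_ : Nat) =>
        (s.1 + (q + if s.2.1 > 0 then 1 else 0), s.2.1 - 1,
         s.2.2 ++ [[s.1, s.1 + (q + if s.2.1 > 0 then 1 else 0)]]))
      (0, r, [])
    = ((n : Int) * q + min (n : Int) r, r - (n : Int),
       (List.range n).map (fun (k : Nat) =>
         [(k : Int) * q + min (k : Int) r,
          ((k : Int) + 1) * q + min ((k : Int) + 1) r])) := by
  induction n with
  | zero => simp; omega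
  | succ n ih =>
    rw [List.range_succ, List.foldl_append, ih, List.map_append]
    simp only [List.foldl_cons, List.foldl_nil, List.map_cons, List.map_nil]
    push_cast
    have h1 : min (n : Int) r + (if r - n > 0 then 1 else 0) = min ((n : Int) + 1) r := by
      split_ifs with h <;> omega
    refine Prod.ext ?_ (Prod.ext ?_ ?_) <;> simp only
    · rw [← h1]; ring
    · ring
    · congr 2
      rw [← h1]; ring_nf

-- ===== VERDICT (by name: the statement is the Claim_ definition above) =====
theorem distribute_workload_spec : Claim_equal_distribute_workload := by
  intro m c _ hc
  unfold Spec_distribute_workload distribute_workload distribute_workload_alt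
  rcases lt_or_gt_of_ne hc with h | h
  · have hz : c.toNat = 0 := by omega
    simp [PySem.List.pyRange_one, hz]
  · have hr : 0 ≤ PySem.Int.mod m c := PySem.Int.mod_nonneg m h
    simp only [PySem.List.pyRange_one, Int.sub_zero, List.foldl_map, List.map_map]
    rw [dw_loop_inv (PySem.Int.floordiv m c) (PySem.Int.mod m c) hr c.toNat]
    apply List.map_congr_left
    intro k _
    simp
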